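-- pv_equiv track=rewrite | github.com/DoukanK67/Kriptoloji-Proje | app.py | route_encrypt
-- ===== SOURCE A (Python) =====
-- def route_encrypt(text: str, rows: int, cols: int, direction: str = "spiral") -> str:
--   """Route şifreleme - metni grid'e yerleştirip belirli rotada okur"""
--   if rows < 1 or cols < 1:
--     return text
--
--   text_clean = "".join(ch for ch in text)
--   grid_size = rows * cols
--
--   # Metni grid'e yerleştir (kalan yerleri boşluk veya X ile doldur)
--   text_padded = text_clean.ljust(grid_size, "X")
--
--   # Grid oluştur
--   grid = []
--   for i in range(rows):
--     row = []
--     for j in range(cols):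
--       row.append(text_padded[i * cols + j])
--     grid.append(row)
--
--   # Spiral rotada oku (saat yönünde, dıştan içe)
--   result = []
--   visited = [[False for _ in range(cols)] for _ in range(rows)]
--
--   directions = [(0, 1), (1, 0), (0, -1), (-1, 0)]  # sağ, aşağı, sol, yukarı
--   dir_idx = 0
--   row, col = 0, 0
--
--   for _ in range(grid_size):
--     result.append(grid[row][col])
--     visited[row][col] = True
--
--     # Sonraki pozisyonu kontrol et
--     next_row = row + directions[dir_idx][0]
--     next_col = col + directions[dir_idx][1]
--
--     # Eğer sınırları aşıyorsa veya ziyaret edilmişse yön değiştir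
--     if (next_row < 0 or next_row >= rows or
--         next_col < 0 or next_col >= cols or
--         visited[next_row][next_col]):
--       dir_idx = (dir_idx + 1) % 4
--       next_row = row + directions[dir_idx][0]
--       next_col = col + directions[dir_idx][1]
--
--     row, col = next_row, next_col
--
--   return "".join(result)
-- ===== SOURCE B (Python) =====
-- def route_encrypt(text: str, rows: int, cols: int, direction: str = "spiral") -> str:
--   """Route encryption: pad text into a rows x cols grid and read it clockwise
--   spirally using shrinking boundaries (no visited matrix)."""
--   if rows < 1 or cols < 1:
--     return text
--   padded = text.ljust(rows * cols, "X")
--   out = []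
--   top, bottom, left, right = 0, rows - 1, 0, cols - 1
--   while top <= bottom and left <= right:
--     for j in range(left, right + 1):
--       out.append(padded[top * cols + j])
--     top += 1
--     for i in range(top, bottom + 1):
--       out.append(padded[i * cols + right])
--     right -= 1
--     if top <= bottom:
--       for j in range(right, left - 1, -1):
--         out.append(padded[bottom * cols + j])
--       bottom -= 1
--     if left <= right:
--       for i in range(bottom, top - 1, -1):
--         out.append(padded[i * cols + left])
--       left += 1
--   return "".join(out)
-- ===== Notes on version B (the rewrite author's own statement) =====
-- stated objective: simpler
-- what changed: Replaces the step-by-step walk with a visited boolean matrix and direction-turning logic by a boundary-shrinking spiral (top/bottom/left/right indices) read directly off the padded string, with no grid and no visited matrix.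
import Mathlib
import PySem

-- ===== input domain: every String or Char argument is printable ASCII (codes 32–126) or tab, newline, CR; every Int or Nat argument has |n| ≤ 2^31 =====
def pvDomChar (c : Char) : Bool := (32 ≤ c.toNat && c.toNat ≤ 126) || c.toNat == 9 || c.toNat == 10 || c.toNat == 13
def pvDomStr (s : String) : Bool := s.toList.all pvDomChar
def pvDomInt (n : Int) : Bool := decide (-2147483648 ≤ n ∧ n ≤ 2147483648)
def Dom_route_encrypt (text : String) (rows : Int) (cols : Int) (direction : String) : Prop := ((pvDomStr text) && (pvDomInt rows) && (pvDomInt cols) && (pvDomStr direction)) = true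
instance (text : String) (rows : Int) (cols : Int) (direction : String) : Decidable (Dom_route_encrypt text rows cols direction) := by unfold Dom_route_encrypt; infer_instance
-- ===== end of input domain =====

-- B reads the padded text in a boundary-shrinking spiral instead of A's visited-matrix walk; objective: simpler.


-- ===== PORT A =====

-- exact hand port of Python str.ljust(width, fill) (no PySem primitive covers it)
def pyLjust (s : List Char) (w : Int) (f : Char) : List Char :=
  if w ≤ (s.length : Int) then s else s ++ List.replicate (w - s.length).toNat f

def aDirs : List (Int × Int) := [(0, 1), (1, 0), (0, -1), (-1, 0)]

-- the body of A's `for _ in range(grid_size)` loop, acting on (result, visited, dir_idx, row, col)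
def aStep (rows cols : Int) (grid : List (List Char)) :
    (List Char × List (List Bool) × Int × Int × Int) → (List Char × List (List Bool) × Int × Int × Int) :=
  fun (res, vis, dirIdx, row, col) =>
    let res' := res ++ [PySem.List.pyGetD (PySem.List.pyGetD grid row []) col 'X']
    let vis' := PySem.List.pySetD vis row (PySem.List.pySetD (PySem.List.pyGetD vis row []) col true)
    let d := PySem.List.pyGetD aDirs dirIdx (0, 0)
    let nr := row + d.1
    let nc := col + d.2
    if nr < 0 ∨ nr ≥ rows ∨ nc < 0 ∨ nc ≥ cols ∨ PySem.List.pyGetD (PySem.List.pyGetD vis' nr []) nc false then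
      let dirIdx' := PySem.Int.mod (dirIdx + 1) 4
      let d' := PySem.List.pyGetD aDirs dirIdx' (0, 0)
      (res', vis', dirIdx', row + d'.1, col + d'.2)
    else
      (res', vis', dirIdx, nr, nc)

def route_encrypt (text : String) (rows : Int) (cols : Int) (direction : String) : String :=
  if rows < 1 ∨ cols < 1 then text
  else
    let textClean := text.toList            -- "".join(ch for ch in text): the same characters
    let gridSize := rows * cols
    let textPadded := pyLjust textClean gridSize 'X'
    let grid : List (List Char) :=
      (PySem.List.pyRange 0 rows 1).map (fun i =>
        (PySem.List.pyRange 0 cols 1).map (fun j =>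
          PySem.List.pyGetD textPadded (i * cols + j) 'X'))
    let visited : List (List Bool) :=
      (PySem.List.pyRange 0 rows 1).map (fun _ =>
        (PySem.List.pyRange 0 cols 1).map (fun _ => false))
    let final := (PySem.List.pyRange 0 gridSize 1).foldl
        (fun st _ => aStep rows cols grid st) ([], visited, 0, 0, 0)
    String.ofList final.1

-- ===== PORT B =====

-- one while-iteration of Source B, recursing on the shrunken boundaries
def bSpiral (padded : List Char) (cols : Int) (top bottom left right : Int) : List Char :=
  if top ≤ bottom ∧ left ≤ right then
    let e1 := (PySem.List.pyRange left (right + 1) 1).map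
        (fun j => PySem.List.pyGetD padded (top * cols + j) 'X')
    let top' := top + 1
    let e2 := (PySem.List.pyRange top' (bottom + 1) 1).map
        (fun i => PySem.List.pyGetD padded (i * cols + right) 'X')
    let right' := right - 1
    let e3 := if top' ≤ bottom then
        (PySem.List.pyRange right' (left - 1) (-1)).map
          (fun j => PySem.List.pyGetD padded (bottom * cols + j) 'X')
      else []
    let bottom' := if top' ≤ bottom then bottom - 1 else bottom
    let e4 := if left ≤ right' then
        (PySem.List.pyRange bottom' (top' - 1) (-1)).map
          (fun i => PySem.List.pyGetD padded (i * cols + left) 'X')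
      else []
    let left' := if left ≤ right' then left + 1 else left
    e1 ++ e2 ++ e3 ++ e4 ++ bSpiral padded cols top' bottom' left' right'
  else []
termination_by ((bottom + 1 - top) + (right + 1 - left)).toNat
decreasing_by
  split_ifs <;> omega

def route_encrypt_alt (text : String) (rows : Int) (cols : Int) (direction : String) : String :=
  if rows < 1 ∨ cols < 1 then text
  else
    let padded := pyLjust text.toList (rows * cols) 'X'
    String.ofList (bSpiral padded cols 0 (rows - 1) 0 (cols - 1))

-- ===== PRECONDITION & SPEC =====
def Spec_route_encrypt (text : String) (rows : Int) (cols : Int) (direction : String) (out : String) : Prop := out = route_encrypt_alt text rows cols direction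
instance (text : String) (rows : Int) (cols : Int) (direction : String) (out : String) : Decidable (Spec_route_encrypt text rows cols direction out) := by unfold Spec_route_encrypt; infer_instance

-- ===== CLAIM (what is proved, stated in full; the proofs are below) =====
def Claim_equal_route_encrypt : Prop := ∀ (text : String) (rows : Int) (cols : Int) (direction : String), Dom_route_encrypt text rows cols direction → Spec_route_encrypt text rows cols direction (route_encrypt text rows cols direction)


-- ===== LEMMAS AND PROOFS =====

-- a rows×cols matrix given by a coordinate function
def mk2 {α : Type} (rows cols : Int) (g : Int → Int → α) : List (List α) :=
  (PySem.List.pyRange 0 rows 1).map (fun i => (PySem.List.pyRange 0 cols 1).map (fun j => g i j))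

-- the character A's grid holds at (i, j), read straight from the padded text
def fch (padded : List Char) (cols i j : Int) : Char :=
  PySem.List.pyGetD padded (i * cols + j) 'X'

def stp (padded : List Char) (rows cols : Int) :
    (List Char × List (List Bool) × Int × Int × Int) → (List Char × List (List Bool) × Int × Int × Int) :=
  aStep rows cols (mk2 rows cols (fch padded cols))

theorem foldl_const_iterate {α β : Type} (l : List β) (F : α → α) (init : α) :
    l.foldl (fun s _ => F s) init = F^[l.length] init := by
  induction l generalizing init with
  | nil => rfl
  | cons x xs ih => simpa [Function.iterate_succ_apply] using ih (F init)

theorem pyRange_neg_one_split (a b : Int) (h : b < a) :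
    PySem.List.pyRange a b (-1) = PySem.List.pyRange a (b+1) (-1) ++ [b+1] := by
  rw [PySem.List.pyRange_neg_one_eq_reverse, PySem.List.pyRange_neg_one_eq_reverse,
      PySem.List.pyRange_one_cons (by omega)]
  simp

theorem mk2_get {α : Type} (rows cols : Int) (g : Int → Int → α) (i j : Int) (d0 : List α) (d : α)
    (hi0 : 0 ≤ i) (hi1 : i < rows) (hj0 : 0 ≤ j) (hj1 : j < cols) :
    PySem.List.pyGetD (PySem.List.pyGetD (mk2 rows cols g) i d0) j d = g i j := by
  unfold mk2
  rw [PySem.List.pyGetD_map_pyRange_of_nonneg _ _ _ _ hi0 hi1,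
      PySem.List.pyGetD_map_pyRange_of_nonneg _ _ _ _ hj0 hj1]

theorem mk2_congr {α : Type} (rows cols : Int) (g h : Int → Int → α)
    (H : ∀ i j, 0 ≤ i → i < rows → 0 ≤ j → j < cols → g i j = h i j) :
    mk2 rows cols g = mk2 rows cols h := by
  unfold mk2
  apply List.map_congr_left
  intro i hi
  rw [PySem.List.mem_pyRange_one] at hi
  apply List.map_congr_left
  intro j hj
  rw [PySem.List.mem_pyRange_one] at hj
  exact H i j hi.1 hi.2 hj.1 hj.2

theorem pySetD_map_pyRange {α : Type} (n : Int) (g : Int → α) (i : Int) (v : α)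
    (hi0 : 0 ≤ i) (hi1 : i < n) :
    PySem.List.pySetD ((PySem.List.pyRange 0 n 1).map g) i v
      = (PySem.List.pyRange 0 n 1).map (fun x => if x = i then v else g x) := by
  obtain ⟨iN, rfl⟩ : ∃ m : Nat, (m : Int) = i := ⟨i.toNat, by omega⟩
  simp only [PySem.List.pySetD_natCast]
  apply List.ext_getElem
  · simp
  · intro k h1 h2
    have hk : k < n.toNat := by simpa [PySem.List.length_pyRange_one] using h2
    simp only [List.getElem_set, List.getElem_map, PySem.List.getElem_pyRange_one, zero_add]
    split_ifs with hA hB hB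
    · rfl
    · omega
    · omega
    · rfl

theorem mk2_set (rows cols : Int) (P : Int → Int → Bool) (i j : Int)
    (hi0 : 0 ≤ i) (hi1 : i < rows) (hj0 : 0 ≤ j) (hj1 : j < cols) :
    PySem.List.pySetD (mk2 rows cols P) i
      (PySem.List.pySetD (PySem.List.pyGetD (mk2 rows cols P) i []) j true) =
    mk2 rows cols (fun a b => if a = i ∧ b = j then true else P a b) := by
  unfold mk2
  rw [PySem.List.pyGetD_map_pyRange_of_nonneg _ _ _ _ hi0 hi1]
  rw [pySetD_map_pyRange _ _ _ _ hj0 hj1]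
  rw [pySetD_map_pyRange _ _ _ _ hi0 hi1]
  apply List.map_congr_left
  intro a ha
  by_cases hai : a = i
  · subst hai
    rw [if_pos rfl]
    apply List.map_congr_left
    intro b hb
    by_cases hbj : b = j
    · simp [hbj]
    · simp [hbj]
  · rw [if_neg hai]
    apply List.map_congr_left
    intro b hb
    have hnc : ¬ (a = i ∧ b = j) := fun h => hai h.1
    simp [hnc]

theorem not_decide_eq {p q : Prop} [Decidable p] [Decidable q] (h : p ↔ q) :
    (!decide p) = (!decide q) :=
  congrArg Bool.not (decide_eq_decide.mpr h)

theorem dirs0 : PySem.List.pyGetD aDirs 0 (0, 0) = (0, 1) := by decide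
theorem dirs1 : PySem.List.pyGetD aDirs 1 (0, 0) = (1, 0) := by decide
theorem dirs2 : PySem.List.pyGetD aDirs 2 (0, 0) = (0, -1) := by decide
theorem dirs3 : PySem.List.pyGetD aDirs 3 (0, 0) = (-1, 0) := by decide
theorem mod01 : PySem.Int.mod (0 + 1) 4 = 1 := by decide
theorem mod12 : PySem.Int.mod (1 + 1) 4 = 2 := by decide
theorem mod23 : PySem.Int.mod (2 + 1) 4 = 3 := by decide
theorem mod30 : PySem.Int.mod (3 + 1) 4 = 0 := by decide

-- one loop iteration of A in which the tentative next cell is free: move straight on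
theorem stp_go (padded : List Char) (rows cols : Int) (acc : List Char)
    (P Q : Int → Int → Bool) (dIdx row col dr dc nr nc : Int)
    (hd : PySem.List.pyGetD aDirs dIdx (0, 0) = (dr, dc))
    (hnr : nr = row + dr) (hnc : nc = col + dc)
    (hr0 : 0 ≤ row) (hr1 : row < rows) (hc0 : 0 ≤ col) (hc1 : col < cols)
    (hn0 : 0 ≤ nr) (hn1 : nr < rows) (hm0 : 0 ≤ nc) (hm1 : nc < cols)
    (hQ : ∀ a b, 0 ≤ a → a < rows → 0 ≤ b → b < cols →
        (if a = row ∧ b = col then true else P a b) = Q a b)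
    (hfree : Q nr nc = false) :
    stp padded rows cols (acc, mk2 rows cols P, dIdx, row, col)
      = (acc ++ [fch padded cols row col], mk2 rows cols Q, dIdx, nr, nc) := by
  subst hnr hnc
  have hg := mk2_get rows cols (fch padded cols) row col [] 'X' hr0 hr1 hc0 hc1
  have hset := (mk2_set rows cols P row col hr0 hr1 hc0 hc1).trans
      (mk2_congr rows cols _ Q hQ)
  have hlook := mk2_get rows cols Q (row + dr) (col + dc) [] false hn0 hn1 hm0 hm1
  simp only [stp, aStep, hd, hg, hset, hlook, hfree]
  rw [if_neg]
  intro h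
  rcases h with h | h | h | h | h
  · omega
  · omega
  · omega
  · omega
  · simp at h

-- one loop iteration of A in which the tentative next cell is blocked: turn once, then move
theorem stp_turn (padded : List Char) (rows cols : Int) (acc : List Char)
    (P Q : Int → Int → Bool) (dIdx dIdx' row col dr dc dr' dc' nr nc : Int)
    (hd : PySem.List.pyGetD aDirs dIdx (0, 0) = (dr, dc))
    (hmod : PySem.Int.mod (dIdx + 1) 4 = dIdx')
    (hd' : PySem.List.pyGetD aDirs dIdx' (0, 0) = (dr', dc'))
    (hnr : nr = row + dr') (hnc : nc = col + dc')
    (hr0 : 0 ≤ row) (hr1 : row < rows) (hc0 : 0 ≤ col) (hc1 : col < cols)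
    (hQ : ∀ a b, 0 ≤ a → a < rows → 0 ≤ b → b < cols →
        (if a = row ∧ b = col then true else P a b) = Q a b)
    (hblock : row + dr < 0 ∨ rows ≤ row + dr ∨ col + dc < 0 ∨ cols ≤ col + dc ∨
        (0 ≤ row + dr ∧ row + dr < rows ∧ 0 ≤ col + dc ∧ col + dc < cols ∧
         Q (row + dr) (col + dc) = true)) :
    stp padded rows cols (acc, mk2 rows cols P, dIdx, row, col)
      = (acc ++ [fch padded cols row col], mk2 rows cols Q, dIdx', nr, nc) := by
  subst hnr hnc
  have hg := mk2_get rows cols (fch padded cols) row col [] 'X' hr0 hr1 hc0 hc1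
  have hset := (mk2_set rows cols P row col hr0 hr1 hc0 hc1).trans
      (mk2_congr rows cols _ Q hQ)
  simp only [stp, aStep, hd, hg, hset, hmod, hd']
  rw [if_pos]
  rcases hblock with h | h | h | h | h
  · exact Or.inl h
  · exact Or.inr (Or.inl (by omega))
  · exact Or.inr (Or.inr (Or.inl h))
  · exact Or.inr (Or.inr (Or.inr (Or.inl (by omega))))
  · refine Or.inr (Or.inr (Or.inr (Or.inr ?_)))
    rw [mk2_get rows cols Q (row + dr) (col + dc) [] false h.1 h.2.1 h.2.2.1 h.2.2.2.1]
    exact h.2.2.2.2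

-- walking right along the top row of the rectangle [t..b]×[l..r]
theorem eastE (padded : List Char) (rows cols t b l r : Int)
    (ht0 : 0 ≤ t) (htb : t ≤ b) (hb1 : b < rows) (hl0 : 0 ≤ l) (hr1 : r < cols) :
    ∀ (n : Nat) (c : Int) (acc : List Char), c + (n : Int) = r → l ≤ c →
    (stp padded rows cols)^[n]
      (acc, mk2 rows cols (fun i j => !decide ((t+1 ≤ i ∧ i ≤ b ∧ l ≤ j ∧ j ≤ r) ∨ (i = t ∧ c ≤ j ∧ j ≤ r))), 0, t, c)
      = (acc ++ (PySem.List.pyRange c r 1).map (fun j => fch padded cols t j),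
         mk2 rows cols (fun i j => !decide ((t+1 ≤ i ∧ i ≤ b ∧ l ≤ j ∧ j ≤ r) ∨ (i = t ∧ j = r))), 0, t, r) := by
  intro n
  induction n with
  | zero =>
    intro c acc hc hlc
    have hc' : c = r := by omega
    rw [hc', Function.iterate_zero_apply, PySem.List.pyRange_one_eq_nil (le_refl r),
        List.map_nil, List.append_nil,
        show (mk2 rows cols (fun i j => !decide ((t+1 ≤ i ∧ i ≤ b ∧ l ≤ j ∧ j ≤ r) ∨ (i = t ∧ r ≤ j ∧ j ≤ r))))
           = (mk2 rows cols (fun i j => !decide ((t+1 ≤ i ∧ i ≤ b ∧ l ≤ j ∧ j ≤ r) ∨ (i = t ∧ j = r))))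
         from mk2_congr _ _ _ _ (fun i j _ _ _ _ => not_decide_eq (by omega))]
  | succ m ih =>
    intro c acc hc hlc
    have hcr : c < r := by omega
    rw [Function.iterate_succ_apply,
        stp_go padded rows cols acc _
          (fun i j => !decide ((t+1 ≤ i ∧ i ≤ b ∧ l ≤ j ∧ j ≤ r) ∨ (i = t ∧ c + 1 ≤ j ∧ j ≤ r)))
          0 t c 0 1 t (c + 1) dirs0 (by omega) (by omega)
          ht0 (by omega) (by omega) (by omega) ht0 (by omega) (by omega) (by omega)
          (fun a bb _ _ _ _ => by
            by_cases h : a = t ∧ bb = c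
            · rw [if_pos h]; simp; omega
            · rw [if_neg h]; exact not_decide_eq (by omega))
          (by simp; omega),
        ih (c + 1) (acc ++ [fch padded cols t c]) (by omega) (by omega),
        List.append_assoc, PySem.List.pyRange_one_cons hcr, List.map_cons,
        List.singleton_append]

-- walking down the right column
theorem southS (padded : List Char) (rows cols t b l r : Int)
    (ht0 : 0 ≤ t) (htb : t < b) (hb1 : b < rows) (hl0 : 0 ≤ l) (hlr : l ≤ r) (hr1 : r < cols) :
    ∀ (n : Nat) (i : Int) (acc : List Char), i + (n : Int) = b → t + 1 ≤ i →
    (stp padded rows cols)^[n]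
      (acc, mk2 rows cols (fun a j => !decide ((t+1 ≤ a ∧ a ≤ b ∧ l ≤ j ∧ j ≤ r-1) ∨ (j = r ∧ i ≤ a ∧ a ≤ b))), 1, i, r)
      = (acc ++ (PySem.List.pyRange i b 1).map (fun a => fch padded cols a r),
         mk2 rows cols (fun a j => !decide ((t+1 ≤ a ∧ a ≤ b ∧ l ≤ j ∧ j ≤ r-1) ∨ (j = r ∧ a = b))), 1, b, r) := by
  intro n
  induction n with
  | zero =>
    intro i acc hi hti
    have hi' : i = b := by omega
    rw [hi', Function.iterate_zero_apply, PySem.List.pyRange_one_eq_nil (le_refl b),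
        List.map_nil, List.append_nil,
        show (mk2 rows cols (fun a j => !decide ((t+1 ≤ a ∧ a ≤ b ∧ l ≤ j ∧ j ≤ r-1) ∨ (j = r ∧ b ≤ a ∧ a ≤ b))))
           = (mk2 rows cols (fun a j => !decide ((t+1 ≤ a ∧ a ≤ b ∧ l ≤ j ∧ j ≤ r-1) ∨ (j = r ∧ a = b))))
         from mk2_congr _ _ _ _ (fun a j _ _ _ _ => not_decide_eq (by omega))]
  | succ m ih =>
    intro i acc hi hti
    have hib : i < b := by omega
    rw [Function.iterate_succ_apply,
        stp_go padded rows cols acc _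
          (fun a j => !decide ((t+1 ≤ a ∧ a ≤ b ∧ l ≤ j ∧ j ≤ r-1) ∨ (j = r ∧ i + 1 ≤ a ∧ a ≤ b)))
          1 i r 1 0 (i + 1) r dirs1 (by omega) (by omega)
          (by omega) (by omega) (by omega) hr1 (by omega) (by omega) (by omega) hr1
          (fun a bb _ _ _ _ => by
            by_cases h : a = i ∧ bb = r
            · rw [if_pos h]; simp; omega
            · rw [if_neg h]; exact not_decide_eq (by omega))
          (by simp; omega),
        ih (i + 1) (acc ++ [fch padded cols i r]) (by omega) (by omega),
        List.append_assoc, PySem.List.pyRange_one_cons hib, List.map_cons,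
        List.singleton_append]

-- walking left along the bottom row
theorem westW (padded : List Char) (rows cols t b l r : Int)
    (ht0 : 0 ≤ t) (htb : t < b) (hb1 : b < rows) (hl0 : 0 ≤ l) (hr1 : r < cols) :
    ∀ (n : Nat) (c : Int) (acc : List Char), c - (n : Int) = l → c ≤ r - 1 →
    (stp padded rows cols)^[n]
      (acc, mk2 rows cols (fun i j => !decide ((t+1 ≤ i ∧ i ≤ b-1 ∧ l ≤ j ∧ j ≤ r-1) ∨ (i = b ∧ l ≤ j ∧ j ≤ c))), 2, b, c)
      = (acc ++ (PySem.List.pyRange c l (-1)).map (fun j => fch padded cols b j),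
         mk2 rows cols (fun i j => !decide ((t+1 ≤ i ∧ i ≤ b-1 ∧ l ≤ j ∧ j ≤ r-1) ∨ (i = b ∧ j = l))), 2, b, l) := by
  intro n
  induction n with
  | zero =>
    intro c acc hc hcr
    have hc' : c = l := by omega
    rw [hc', Function.iterate_zero_apply, PySem.List.pyRange_neg_one_eq_nil (le_refl l),
        List.map_nil, List.append_nil,
        show (mk2 rows cols (fun i j => !decide ((t+1 ≤ i ∧ i ≤ b-1 ∧ l ≤ j ∧ j ≤ r-1) ∨ (i = b ∧ l ≤ j ∧ j ≤ l))))
           = (mk2 rows cols (fun i j => !decide ((t+1 ≤ i ∧ i ≤ b-1 ∧ l ≤ j ∧ j ≤ r-1) ∨ (i = b ∧ j = l))))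
         from mk2_congr _ _ _ _ (fun i j _ _ _ _ => not_decide_eq (by omega))]
  | succ m ih =>
    intro c acc hc hcr
    have hlc : l < c := by omega
    rw [Function.iterate_succ_apply,
        stp_go padded rows cols acc _
          (fun i j => !decide ((t+1 ≤ i ∧ i ≤ b-1 ∧ l ≤ j ∧ j ≤ r-1) ∨ (i = b ∧ l ≤ j ∧ j ≤ c - 1)))
          2 b c 0 (-1) b (c - 1) dirs2 (by omega) (by omega)
          (by omega) hb1 (by omega) (by omega) (by omega) hb1 (by omega) (by omega)
          (fun a bb _ _ _ _ => by
            by_cases h : a = b ∧ bb = c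
            · rw [if_pos h]; simp; omega
            · rw [if_neg h]; exact not_decide_eq (by omega))
          (by simp; omega),
        ih (c - 1) (acc ++ [fch padded cols b c]) (by omega) (by omega),
        List.append_assoc, PySem.List.pyRange_neg_one_cons hlc, List.map_cons,
        List.singleton_append]

-- walking up the left column
theorem northN (padded : List Char) (rows cols t b l r : Int)
    (ht0 : 0 ≤ t) (htb : t < b) (hb1 : b < rows) (hl0 : 0 ≤ l) (hlr : l ≤ r) (hr1 : r < cols) :
    ∀ (n : Nat) (i : Int) (acc : List Char), i - (n : Int) = t + 1 → i ≤ b - 1 →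
    (stp padded rows cols)^[n]
      (acc, mk2 rows cols (fun a j => !decide ((t+1 ≤ a ∧ a ≤ b-1 ∧ l+1 ≤ j ∧ j ≤ r-1) ∨ (j = l ∧ t+1 ≤ a ∧ a ≤ i))), 3, i, l)
      = (acc ++ (PySem.List.pyRange i (t+1) (-1)).map (fun a => fch padded cols a l),
         mk2 rows cols (fun a j => !decide ((t+1 ≤ a ∧ a ≤ b-1 ∧ l+1 ≤ j ∧ j ≤ r-1) ∨ (j = l ∧ a = t+1))), 3, t+1, l) := by
  intro n
  induction n with
  | zero =>
    intro i acc hi hib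
    have hi' : i = t + 1 := by omega
    rw [hi', Function.iterate_zero_apply, PySem.List.pyRange_neg_one_eq_nil (by omega),
        List.map_nil, List.append_nil,
        show (mk2 rows cols (fun a j => !decide ((t+1 ≤ a ∧ a ≤ b-1 ∧ l+1 ≤ j ∧ j ≤ r-1) ∨ (j = l ∧ t+1 ≤ a ∧ a ≤ t+1))))
           = (mk2 rows cols (fun a j => !decide ((t+1 ≤ a ∧ a ≤ b-1 ∧ l+1 ≤ j ∧ j ≤ r-1) ∨ (j = l ∧ a = t+1))))
         from mk2_congr _ _ _ _ (fun a j _ _ _ _ => not_decide_eq (by omega))]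
  | succ m ih =>
    intro i acc hi hib
    have hti : t + 1 < i := by omega
    rw [Function.iterate_succ_apply,
        stp_go padded rows cols acc _
          (fun a j => !decide ((t+1 ≤ a ∧ a ≤ b-1 ∧ l+1 ≤ j ∧ j ≤ r-1) ∨ (j = l ∧ t+1 ≤ a ∧ a ≤ i - 1)))
          3 i l (-1) 0 (i - 1) l dirs3 (by omega) (by omega)
          (by omega) (by omega) hl0 (by omega) (by omega) (by omega) hl0 (by omega)
          (fun a bb _ _ _ _ => by
            by_cases h : a = i ∧ bb = l
            · rw [if_pos h]; simp; omega
            · rw [if_neg h]; exact not_decide_eq (by omega))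
          (by simp; omega),
        ih (i - 1) (acc ++ [fch padded cols i l]) (by omega) (by omega),
        List.append_assoc, PySem.List.pyRange_neg_one_cons hti, List.map_cons,
        List.singleton_append]

-- the four corner steps: A turns clockwise once and moves without re-checking
theorem cornerTR (padded : List Char) (rows cols t b l r : Int)
    (ht0 : 0 ≤ t) (htb : t ≤ b) (hb1 : b < rows) (hl0 : 0 ≤ l) (hlr : l ≤ r) (hr1 : r < cols)
    (acc : List Char) :
    stp padded rows cols
      (acc, mk2 rows cols (fun i j => !decide ((t+1 ≤ i ∧ i ≤ b ∧ l ≤ j ∧ j ≤ r) ∨ (i = t ∧ j = r))), 0, t, r)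
      = (acc ++ [fch padded cols t r],
         mk2 rows cols (fun i j => !decide (t+1 ≤ i ∧ i ≤ b ∧ l ≤ j ∧ j ≤ r)), 1, t + 1, r) := by
  refine stp_turn padded rows cols acc _ _ 0 1 t r 0 1 1 0 (t + 1) r dirs0 mod01 dirs1
    (by omega) (by omega) ht0 (by omega) (by omega) hr1
    (fun a bb _ _ _ _ => by
      by_cases h : a = t ∧ bb = r
      · rw [if_pos h]; simp; omega
      · rw [if_neg h]; exact not_decide_eq (by omega)) ?_
  by_cases hc : r + 1 < cols
  · exact Or.inr (Or.inr (Or.inr (Or.inr ⟨by omega, by omega, by omega, by omega, by simp⟩)))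
  · exact Or.inr (Or.inr (Or.inr (Or.inl (by omega))))

theorem cornerBR (padded : List Char) (rows cols t b l r : Int)
    (ht0 : 0 ≤ t) (htb : t < b) (hb1 : b < rows) (hl0 : 0 ≤ l) (hlr : l ≤ r) (hr1 : r < cols)
    (acc : List Char) :
    stp padded rows cols
      (acc, mk2 rows cols (fun a j => !decide ((t+1 ≤ a ∧ a ≤ b ∧ l ≤ j ∧ j ≤ r-1) ∨ (j = r ∧ a = b))), 1, b, r)
      = (acc ++ [fch padded cols b r],
         mk2 rows cols (fun a j => !decide (t+1 ≤ a ∧ a ≤ b ∧ l ≤ j ∧ j ≤ r-1)), 2, b, r - 1) := by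
  refine stp_turn padded rows cols acc _ _ 1 2 b r 1 0 0 (-1) b (r - 1) dirs1 mod12 dirs2
    (by omega) (by omega) (by omega) hb1 (by omega) hr1
    (fun a bb _ _ _ _ => by
      by_cases h : a = b ∧ bb = r
      · rw [if_pos h]; simp; omega
      · rw [if_neg h]; exact not_decide_eq (by omega)) ?_
  by_cases hc : b + 1 < rows
  · exact Or.inr (Or.inr (Or.inr (Or.inr ⟨by omega, by omega, by omega, by omega, by simp⟩)))
  · exact Or.inr (Or.inl (by omega))

theorem cornerBL (padded : List Char) (rows cols t b l r : Int)
    (ht0 : 0 ≤ t) (htb : t < b) (hb1 : b < rows) (hl0 : 0 ≤ l) (hlr : l ≤ r) (hr1 : r < cols)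
    (acc : List Char) :
    stp padded rows cols
      (acc, mk2 rows cols (fun i j => !decide ((t+1 ≤ i ∧ i ≤ b-1 ∧ l ≤ j ∧ j ≤ r-1) ∨ (i = b ∧ j = l))), 2, b, l)
      = (acc ++ [fch padded cols b l],
         mk2 rows cols (fun i j => !decide (t+1 ≤ i ∧ i ≤ b-1 ∧ l ≤ j ∧ j ≤ r-1)), 3, b - 1, l) := by
  refine stp_turn padded rows cols acc _ _ 2 3 b l 0 (-1) (-1) 0 (b - 1) l dirs2 mod23 dirs3
    (by omega) (by omega) (by omega) hb1 hl0 (by omega)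
    (fun a bb _ _ _ _ => by
      by_cases h : a = b ∧ bb = l
      · rw [if_pos h]; simp; omega
      · rw [if_neg h]; exact not_decide_eq (by omega)) ?_
  by_cases hc : 0 ≤ l - 1
  · exact Or.inr (Or.inr (Or.inr (Or.inr ⟨by omega, by omega, by omega, by omega, by simp⟩)))
  · exact Or.inr (Or.inr (Or.inl (by omega)))

theorem cornerTL (padded : List Char) (rows cols t b l r : Int)
    (ht0 : 0 ≤ t) (htb : t < b) (hb1 : b < rows) (hl0 : 0 ≤ l) (hlr : l ≤ r) (hr1 : r < cols)
    (acc : List Char) :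
    stp padded rows cols
      (acc, mk2 rows cols (fun a j => !decide ((t+1 ≤ a ∧ a ≤ b-1 ∧ l+1 ≤ j ∧ j ≤ r-1) ∨ (j = l ∧ a = t+1))), 3, t + 1, l)
      = (acc ++ [fch padded cols (t+1) l],
         mk2 rows cols (fun a j => !decide (t+1 ≤ a ∧ a ≤ b-1 ∧ l+1 ≤ j ∧ j ≤ r-1)), 0, t + 1, l + 1) := by
  refine stp_turn padded rows cols acc _ _ 3 0 (t + 1) l (-1) 0 0 1 (t + 1) (l + 1) dirs3 mod30 dirs0
    (by omega) (by omega) (by omega) (by omega) hl0 (by omega)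
    (fun a bb _ _ _ _ => by
      by_cases h : a = t + 1 ∧ bb = l
      · rw [if_pos h]; simp; omega
      · rw [if_neg h]; exact not_decide_eq (by omega)) ?_
  exact Or.inr (Or.inr (Or.inr (Or.inr ⟨by omega, by omega, by omega, by omega, by simp⟩)))

-- B-side: how one while-iteration of Source B unfolds in each shape of rectangle
theorem bSpiral_nil_top (padded : List Char) (cols t b l r : Int) (h : ¬ t ≤ b) :
    bSpiral padded cols t b l r = [] := by
  rw [bSpiral, if_neg (fun hh => h hh.1)]

theorem bSpiral_nil_left (padded : List Char) (cols t b l r : Int) (h : ¬ l ≤ r) :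
    bSpiral padded cols t b l r = [] := by
  rw [bSpiral, if_neg (fun hh => h hh.2)]

theorem bSpiral_row (padded : List Char) (cols t l r : Int) (hlr : l ≤ r) :
    bSpiral padded cols t t l r
      = (PySem.List.pyRange l (r + 1) 1).map (fun j => PySem.List.pyGetD padded (t * cols + j) 'X') := by
  rw [bSpiral, if_pos (⟨le_refl t, hlr⟩ : t ≤ t ∧ l ≤ r)]
  simp only [if_neg (show ¬ (t + 1 ≤ t) by omega),
    PySem.List.pyRange_one_eq_nil (le_refl (t + 1)), add_sub_cancel_right,
    PySem.List.pyRange_neg_one_eq_nil (le_refl t), List.map_nil, ite_self,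
    List.append_nil, List.nil_append]
  rw [bSpiral_nil_top padded cols (t + 1) t _ _ (by omega), List.append_nil]

theorem bSpiral_col (padded : List Char) (cols t b l : Int) (htb : t < b) :
    bSpiral padded cols t b l l
      = (PySem.List.pyRange l (l + 1) 1).map (fun j => PySem.List.pyGetD padded (t * cols + j) 'X')
        ++ (PySem.List.pyRange (t + 1) (b + 1) 1).map (fun i => PySem.List.pyGetD padded (i * cols + l) 'X') := by
  rw [bSpiral, if_pos (⟨by omega, le_refl l⟩ : t ≤ b ∧ l ≤ l)]
  simp only [if_pos (show t + 1 ≤ b by omega), if_neg (show ¬ (l ≤ l - 1) by omega),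
    PySem.List.pyRange_neg_one_eq_nil (le_refl (l - 1)), List.map_nil,
    List.append_nil, List.nil_append]
  rw [bSpiral_nil_left padded cols (t + 1) (b - 1) _ _ (by omega), List.append_nil]

theorem bSpiral_ring (padded : List Char) (cols t b l r : Int) (htb : t < b) (hlr : l < r) :
    bSpiral padded cols t b l r
      = (PySem.List.pyRange l (r + 1) 1).map (fun j => PySem.List.pyGetD padded (t * cols + j) 'X')
        ++ (PySem.List.pyRange (t + 1) (b + 1) 1).map (fun i => PySem.List.pyGetD padded (i * cols + r) 'X')
        ++ (PySem.List.pyRange (r - 1) (l - 1) (-1)).map (fun j => PySem.List.pyGetD padded (b * cols + j) 'X')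
        ++ (PySem.List.pyRange (b - 1) t (-1)).map (fun i => PySem.List.pyGetD padded (i * cols + l) 'X')
        ++ bSpiral padded cols (t + 1) (b - 1) (l + 1) (r - 1) := by
  rw [bSpiral, if_pos (⟨by omega, by omega⟩ : t ≤ b ∧ l ≤ r)]
  simp only [if_pos (show t + 1 ≤ b by omega), if_pos (show l ≤ r - 1 by omega),
    add_sub_cancel_right]

set_option maxHeartbeats 2000000 in
-- A's visited-matrix walk, started on the rectangle [t..b]×[l..r], produces exactly B's spiral of it
theorem mainSpiral (padded : List Char) (rows cols : Int) (t b l r : Int) (acc : List Char)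
    (ht0 : 0 ≤ t) (htb : t ≤ b) (hb1 : b < rows) (hl0 : 0 ≤ l) (hlr : l ≤ r) (hr1 : r < cols) :
    ((stp padded rows cols)^[((b + 1 - t) * (r + 1 - l)).toNat]
        (acc, mk2 rows cols (fun i j => !decide (t ≤ i ∧ i ≤ b ∧ l ≤ j ∧ j ≤ r)), 0, t, l)).1
      = acc ++ bSpiral padded cols t b l r := by
  rcases eq_or_lt_of_le htb with hbt | hbt
  · -- single row: t = b
    subst hbt
    have harea : ((t + 1 - t) * (r + 1 - l)).toNat = 1 + (r - l).toNat := by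
      have h1 : (t + 1 - t) * (r + 1 - l) = r + 1 - l := by ring
      rw [h1]; omega
    rw [show (mk2 rows cols (fun i j => !decide (t ≤ i ∧ i ≤ t ∧ l ≤ j ∧ j ≤ r)))
         = (mk2 rows cols (fun i j => !decide ((t+1 ≤ i ∧ i ≤ t ∧ l ≤ j ∧ j ≤ r) ∨ (i = t ∧ l ≤ j ∧ j ≤ r))))
       from mk2_congr _ _ _ _ (fun i j _ _ _ _ => not_decide_eq (by omega))]
    rw [harea]
    simp only [Function.iterate_add_apply, Function.iterate_one]
    rw [eastE padded rows cols t t l r ht0 le_rfl hb1 hl0 hr1 (r - l).toNat l acc (by omega) le_rfl]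
    rw [cornerTR padded rows cols t t l r ht0 le_rfl hb1 hl0 hlr hr1]
    rw [bSpiral_row padded cols t l r hlr]
    rw [PySem.List.pyRange_one_succ_right hlr, List.map_append]
    simp [fch, List.append_assoc]
  · rcases eq_or_lt_of_le hlr with hrl | hrl
    · -- single column: l = r
      subst hrl
      have harea : ((b + 1 - t) * (l + 1 - l)).toNat = 1 + ((b - (t+1)).toNat + 1) := by
        have h1 : (b + 1 - t) * (l + 1 - l) = b + 1 - t := by ring
        rw [h1]; omega
      rw [show (mk2 rows cols (fun i j => !decide (t ≤ i ∧ i ≤ b ∧ l ≤ j ∧ j ≤ l)))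
           = (mk2 rows cols (fun i j => !decide ((t+1 ≤ i ∧ i ≤ b ∧ l ≤ j ∧ j ≤ l) ∨ (i = t ∧ j = l))))
         from mk2_congr _ _ _ _ (fun i j _ _ _ _ => not_decide_eq (by omega))]
      rw [harea]
      simp only [Function.iterate_add_apply, Function.iterate_one]
      rw [cornerTR padded rows cols t b l l ht0 (by omega) hb1 hl0 le_rfl hr1]
      rw [show (mk2 rows cols (fun i j => !decide (t+1 ≤ i ∧ i ≤ b ∧ l ≤ j ∧ j ≤ l)))
           = (mk2 rows cols (fun a j => !decide ((t+1 ≤ a ∧ a ≤ b ∧ l ≤ j ∧ j ≤ l-1) ∨ (j = l ∧ t+1 ≤ a ∧ a ≤ b))))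
         from mk2_congr _ _ _ _ (fun i j _ _ _ _ => not_decide_eq (by omega))]
      rw [southS padded rows cols t b l l ht0 hbt hb1 hl0 le_rfl hr1 (b - (t+1)).toNat (t+1) _ (by omega) le_rfl]
      rw [cornerBR padded rows cols t b l l ht0 hbt hb1 hl0 le_rfl hr1]
      rw [bSpiral_col padded cols t b l hbt]
      rw [PySem.List.pyRange_one_succ_right (show t + 1 ≤ b by omega), List.map_append]
      simp [fch, PySem.List.pyRange_one_singleton, List.append_assoc]
    · -- full ring: t < b, l < r
      rw [show (mk2 rows cols (fun i j => !decide (t ≤ i ∧ i ≤ b ∧ l ≤ j ∧ j ≤ r)))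
           = (mk2 rows cols (fun i j => !decide ((t+1 ≤ i ∧ i ≤ b ∧ l ≤ j ∧ j ≤ r) ∨ (i = t ∧ l ≤ j ∧ j ≤ r))))
         from mk2_congr _ _ _ _ (fun i j _ _ _ _ => not_decide_eq (by omega))]
      by_cases hN : t + 1 ≤ b - 1
      · have hP : (0:Int) ≤ (b - t - 1) * (r - l - 1) := mul_nonneg (by omega) (by omega)
        have hre : (b + 1 - t) * (r + 1 - l) = (b - t - 1) * (r - l - 1) + (2*(b-t) + 2*(r-l)) := by ring
        have hre2 : (b - 1 + 1 - (t+1)) * (r - 1 + 1 - (l+1)) = (b - t - 1) * (r - l - 1) := by ring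
        have harea : ((b + 1 - t) * (r + 1 - l)).toNat
            = ((b - 1 + 1 - (t+1)) * (r - 1 + 1 - (l+1))).toNat
              + (1 + (((b-1) - (t+1)).toNat + (1 + (((r-1) - l).toNat + (1 + ((b - (t+1)).toNat + (1 + (r - l).toNat))))))) := by
          rw [hre2]
          generalize hg1 : (b - t - 1) * (r - l - 1) = P at hre hP ⊢
          generalize hg2 : (b + 1 - t) * (r + 1 - l) = A at hre ⊢
          omega
        rw [harea]
        simp only [Function.iterate_add_apply, Function.iterate_one]
        rw [eastE padded rows cols t b l r ht0 (by omega) hb1 hl0 hr1 (r - l).toNat l acc (by omega) le_rfl]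
        rw [cornerTR padded rows cols t b l r ht0 (by omega) hb1 hl0 (by omega) hr1]
        rw [show (mk2 rows cols (fun i j => !decide (t+1 ≤ i ∧ i ≤ b ∧ l ≤ j ∧ j ≤ r)))
             = (mk2 rows cols (fun a j => !decide ((t+1 ≤ a ∧ a ≤ b ∧ l ≤ j ∧ j ≤ r-1) ∨ (j = r ∧ t+1 ≤ a ∧ a ≤ b))))
           from mk2_congr _ _ _ _ (fun i j _ _ _ _ => not_decide_eq (by omega))]
        rw [southS padded rows cols t b l r ht0 hbt hb1 hl0 (by omega) hr1 (b - (t+1)).toNat (t+1) _ (by omega) le_rfl]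
        rw [cornerBR padded rows cols t b l r ht0 hbt hb1 hl0 (by omega) hr1]
        rw [show (mk2 rows cols (fun a j => !decide (t+1 ≤ a ∧ a ≤ b ∧ l ≤ j ∧ j ≤ r-1)))
             = (mk2 rows cols (fun i j => !decide ((t+1 ≤ i ∧ i ≤ b-1 ∧ l ≤ j ∧ j ≤ r-1) ∨ (i = b ∧ l ≤ j ∧ j ≤ r-1))))
           from mk2_congr _ _ _ _ (fun i j _ _ _ _ => not_decide_eq (by omega))]
        rw [westW padded rows cols t b l r ht0 hbt hb1 hl0 hr1 ((r-1) - l).toNat (r-1) _ (by omega) le_rfl]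
        rw [cornerBL padded rows cols t b l r ht0 hbt hb1 hl0 (by omega) hr1]
        rw [show (mk2 rows cols (fun i j => !decide (t+1 ≤ i ∧ i ≤ b-1 ∧ l ≤ j ∧ j ≤ r-1)))
             = (mk2 rows cols (fun a j => !decide ((t+1 ≤ a ∧ a ≤ b-1 ∧ l+1 ≤ j ∧ j ≤ r-1) ∨ (j = l ∧ t+1 ≤ a ∧ a ≤ b-1))))
           from mk2_congr _ _ _ _ (fun i j _ _ _ _ => not_decide_eq (by omega))]
        rw [northN padded rows cols t b l r ht0 hbt hb1 hl0 (by omega) hr1 ((b-1) - (t+1)).toNat (b-1) _ (by omega) le_rfl]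
        rw [cornerTL padded rows cols t b l r ht0 hbt hb1 hl0 (by omega) hr1]
        rw [bSpiral_ring padded cols t b l r hbt hrl]
        rw [PySem.List.pyRange_one_succ_right (show l ≤ r by omega),
            PySem.List.pyRange_one_succ_right (show t + 1 ≤ b by omega),
            pyRange_neg_one_split (r-1) (l-1) (by omega),
            pyRange_neg_one_split (b-1) t (by omega)]
        by_cases hI : l + 1 ≤ r - 1
        · rw [mainSpiral padded rows cols (t+1) (b-1) (l+1) (r-1) _ (by omega) (by omega) (by omega) (by omega) hI (by omega)]
          simp [fch, List.append_assoc, List.map_append, sub_add_cancel]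
        · have h0 : ((b - 1 + 1 - (t+1)) * (r - 1 + 1 - (l+1))).toNat = 0 := by
            have h1 : r - 1 + 1 - (l+1) = 0 := by omega
            rw [h1, mul_zero]
            rfl
          rw [h0, Function.iterate_zero_apply]
          rw [bSpiral_nil_left padded cols (t + 1) (b - 1) (l + 1) (r - 1) (by omega)]
          simp [fch, List.append_assoc, List.map_append, sub_add_cancel]
      · -- b = t + 1 : the walk ends at the bottom-left corner
        have harea : ((b + 1 - t) * (r + 1 - l)).toNat
            = 1 + (((r-1) - l).toNat + (1 + ((b - (t+1)).toNat + (1 + (r - l).toNat)))) := by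
          have h1 : (b + 1 - t) * (r + 1 - l) = 2 * (r + 1 - l) := by
            rw [show b = t + 1 by omega]; ring
          rw [h1]; omega
        rw [harea]
        simp only [Function.iterate_add_apply, Function.iterate_one]
        rw [eastE padded rows cols t b l r ht0 (by omega) hb1 hl0 hr1 (r - l).toNat l acc (by omega) le_rfl]
        rw [cornerTR padded rows cols t b l r ht0 (by omega) hb1 hl0 (by omega) hr1]
        rw [show (mk2 rows cols (fun i j => !decide (t+1 ≤ i ∧ i ≤ b ∧ l ≤ j ∧ j ≤ r)))
             = (mk2 rows cols (fun a j => !decide ((t+1 ≤ a ∧ a ≤ b ∧ l ≤ j ∧ j ≤ r-1) ∨ (j = r ∧ t+1 ≤ a ∧ a ≤ b))))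
           from mk2_congr _ _ _ _ (fun i j _ _ _ _ => not_decide_eq (by omega))]
        rw [southS padded rows cols t b l r ht0 hbt hb1 hl0 (by omega) hr1 (b - (t+1)).toNat (t+1) _ (by omega) le_rfl]
        rw [cornerBR padded rows cols t b l r ht0 hbt hb1 hl0 (by omega) hr1]
        rw [show (mk2 rows cols (fun a j => !decide (t+1 ≤ a ∧ a ≤ b ∧ l ≤ j ∧ j ≤ r-1)))
             = (mk2 rows cols (fun i j => !decide ((t+1 ≤ i ∧ i ≤ b-1 ∧ l ≤ j ∧ j ≤ r-1) ∨ (i = b ∧ l ≤ j ∧ j ≤ r-1))))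
           from mk2_congr _ _ _ _ (fun i j _ _ _ _ => not_decide_eq (by omega))]
        rw [westW padded rows cols t b l r ht0 hbt hb1 hl0 hr1 ((r-1) - l).toNat (r-1) _ (by omega) le_rfl]
        rw [cornerBL padded rows cols t b l r ht0 hbt hb1 hl0 (by omega) hr1]
        rw [bSpiral_ring padded cols t b l r hbt hrl]
        rw [PySem.List.pyRange_one_succ_right (show l ≤ r by omega),
            PySem.List.pyRange_one_succ_right (show t + 1 ≤ b by omega),
            pyRange_neg_one_split (r-1) (l-1) (by omega)]
        rw [show b - 1 = t by omega, PySem.List.pyRange_neg_one_eq_nil (le_refl t)]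
        rw [bSpiral_nil_top padded cols (t + 1) t (l + 1) (r - 1) (by omega)]
        simp [fch, List.append_assoc, List.map_append, sub_add_cancel]
termination_by ((b - t) + (r - l)).toNat
decreasing_by omega

-- ===== VERDICT (by name: the statement is the Claim_ definition above) =====
theorem route_encrypt_spec : Claim_equal_route_encrypt := by
  intro text rows cols direction _hdom
  unfold Spec_route_encrypt
  simp only [route_encrypt, route_encrypt_alt]
  by_cases hg : rows < 1 ∨ cols < 1
  · rw [if_pos hg, if_pos hg]
  · rw [if_neg hg, if_neg hg]
    push_neg at hg
    apply congrArg String.ofList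
    rw [foldl_const_iterate, PySem.List.length_pyRange_one]
    have hA : rows * cols - 0 = ((rows - 1) + 1 - 0) * ((cols - 1) + 1 - 0) := by ring
    rw [hA]
    show ((stp (pyLjust text.toList (rows * cols) 'X') rows cols)^[(((rows - 1) + 1 - 0) * ((cols - 1) + 1 - 0)).toNat]
        ([], mk2 rows cols (fun _ _ => false), 0, 0, 0)).1
      = bSpiral (pyLjust text.toList (rows * cols) 'X') cols 0 (rows - 1) 0 (cols - 1)
    rw [show (mk2 rows cols (fun _ _ => false))
         = (mk2 rows cols (fun i j => !decide ((0:Int) ≤ i ∧ i ≤ rows - 1 ∧ (0:Int) ≤ j ∧ j ≤ cols - 1)))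
       from mk2_congr _ _ _ _ (fun i j hi0 hi1 hj0 hj1 => by
         have h : (0:Int) ≤ i ∧ i ≤ rows - 1 ∧ (0:Int) ≤ j ∧ j ≤ cols - 1 := by omega
         simp [h])]
    have := mainSpiral (pyLjust text.toList (rows * cols) 'X') rows cols 0 (rows - 1) 0 (cols - 1) []
      le_rfl (by omega) (by omega) le_rfl (by omega) (by omega)
    simpa using this
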